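-- pv_equiv track=rewrite | github.com/ctl456/geetest_cracker | geetest/trajectory.py | compress_trajectory
-- ===== SOURCE A (Python) =====
-- def compress_trajectory(points):
--     """压缩轨迹：计算相邻点差值"""
--     compressed = []
--     time_accumulator = 0
--
--     for i in range(len(points) - 1):
--         dx = points[i + 1][0] - points[i][0]  # 不要用abs
--         dy = points[i + 1][1] - points[i][1]  # 不要用abs
--         dt = abs(points[i + 1][2] - points[i][2])  # 时间可以用abs
--
--         # 跳过完全相同的点
--         if dx == 0 and dy == 0 and dt == 0:
--             continue
--
--         # 位置不变只累积时间
--         if dx == 0 and dy == 0: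
--             time_accumulator += dt
--         else:
--             compressed.append([dx, dy, dt + time_accumulator])
--             time_accumulator = 0
--
--     # 处理剩余时间
--     if time_accumulator != 0:
--         compressed.append([0, 0, time_accumulator])
--
--     return compressed
-- ===== SOURCE B (Python) =====
-- def compress_trajectory(points):
--     """压缩轨迹：计算相邻点差值 (two-phase: build deltas, then recursive emission)"""
--     deltas = [(b[0] - a[0], b[1] - a[1], abs(b[2] - a[2]))
--               for a, b in zip(points, points[1:])]
--     return _emit(deltas, 0)
--
--
-- def _emit(deltas, pending):
--     if not deltas:
--         return [[0, 0, pending]] if pending != 0 else []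
--     (dx, dy, dt), rest = deltas[0], deltas[1:]
--     if dx == 0 and dy == 0:
--         return _emit(rest, pending + dt)
--     return [[dx, dy, dt + pending]] + _emit(rest, 0)
-- ===== Notes on version B (the rewrite author's own statement) =====
-- stated objective: alternative
-- what changed: Replaces the single index-based loop with a mutable accumulator and a trailing flush by a two-phase design: first build the list of consecutive deltas with zip, then a recursive emitter over that list whose base case handles the leftover stationary time, so there is no post-loop fixup.
import Mathlib
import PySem

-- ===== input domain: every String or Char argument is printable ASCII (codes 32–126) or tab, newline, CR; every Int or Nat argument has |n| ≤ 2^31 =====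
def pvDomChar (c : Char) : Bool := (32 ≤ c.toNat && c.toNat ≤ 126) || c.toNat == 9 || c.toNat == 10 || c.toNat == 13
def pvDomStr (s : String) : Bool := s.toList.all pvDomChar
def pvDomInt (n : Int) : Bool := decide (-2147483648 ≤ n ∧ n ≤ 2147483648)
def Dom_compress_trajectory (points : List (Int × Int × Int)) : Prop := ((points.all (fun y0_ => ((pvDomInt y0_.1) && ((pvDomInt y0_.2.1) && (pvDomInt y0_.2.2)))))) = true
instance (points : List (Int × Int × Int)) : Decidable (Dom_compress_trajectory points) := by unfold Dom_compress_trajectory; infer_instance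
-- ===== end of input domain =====

-- B replaces A's index loop + accumulator + trailing flush by a two-phase design
-- (zip-built delta list, then a recursive emitter); objective: alternative decomposition, same cost.


-- ===== PORT A =====
-- literal port of A: for i in range(len(points)-1) with state (compressed, time_accumulator),
-- then the trailing flush
def ctA_step (points : List (Int × Int × Int)) (st : List (List Int) × Int) (i : Int) :
    List (List Int) × Int :=
  let p := PySem.List.pyGetD points i (0, 0, 0)
  let q := PySem.List.pyGetD points (i + 1) (0, 0, 0)
  let dx := q.1 - p.1
  let dy := q.2.1 - p.2.1
  let dt := |q.2.2 - p.2.2|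
  if dx = 0 ∧ dy = 0 ∧ dt = 0 then st
  else if dx = 0 ∧ dy = 0 then (st.1, st.2 + dt)
  else (st.1 ++ [[dx, dy, dt + st.2]], 0)

def compress_trajectory (points : List (Int × Int × Int)) : List (List Int) :=
  let r := (PySem.List.pyRange 0 ((points.length : Int) - 1) 1).foldl (ctA_step points) ([], 0)
  if r.2 ≠ 0 then r.1 ++ [[0, 0, r.2]] else r.1

-- ===== PORT B =====
-- deltas = [(b0-a0, b1-a1, abs(b2-a2)) for a, b in zip(points, points[1:])]
def ct_deltas (points : List (Int × Int × Int)) : List (Int × Int × Int) :=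
  (points.zip (points.drop 1)).map (fun ab => (ab.2.1 - ab.1.1, ab.2.2.1 - ab.1.2.1, |ab.2.2.2 - ab.1.2.2|))

-- recursive emitter: stationary deltas fold their time into `pending`,
-- a moving delta is emitted with the pending time attached; leftover pending at the end
def ct_emit : List (Int × Int × Int) → Int → List (List Int)
  | [], pending => if pending ≠ 0 then [[0, 0, pending]] else []
  | (dx, dy, dt) :: rest, pending =>
    if dx = 0 ∧ dy = 0 then ct_emit rest (pending + dt)
    else [[dx, dy, dt + pending]] ++ ct_emit rest 0

def compress_trajectory_alt (points : List (Int × Int × Int)) : List (List Int) :=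
  ct_emit (ct_deltas points) 0

-- ===== PRECONDITION & SPEC =====
def Spec_compress_trajectory (points : List (Int × Int × Int)) (out : List (List Int)) : Prop := out = compress_trajectory_alt points
instance (points : List (Int × Int × Int)) (out : List (List Int)) : Decidable (Spec_compress_trajectory points out) := by unfold Spec_compress_trajectory; infer_instance

-- ===== CLAIM (what is proved, stated in full; the proofs are below) =====
def Claim_equal_compress_trajectory : Prop := ∀ (points : List (Int × Int × Int)), Dom_compress_trajectory points → Spec_compress_trajectory points (compress_trajectory points)

-- ===== LEMMAS AND PROOFS =====

-- the delta a given index of A's loop computes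
def ctA_delta (points : List (Int × Int × Int)) (i : Int) : Int × Int × Int :=
  let p := PySem.List.pyGetD points i (0, 0, 0)
  let q := PySem.List.pyGetD points (i + 1) (0, 0, 0)
  (q.1 - p.1, q.2.1 - p.2.1, |q.2.2 - p.2.2|)

-- A's step expressed on the delta value
def ctA_step' (st : List (List Int) × Int) (d : Int × Int × Int) : List (List Int) × Int :=
  if d.1 = 0 ∧ d.2.1 = 0 ∧ d.2.2 = 0 then st
  else if d.1 = 0 ∧ d.2.1 = 0 then (st.1, st.2 + d.2.2)
  else (st.1 ++ [[d.1, d.2.1, d.2.2 + st.2]], 0)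

-- the index range maps exactly onto B's zip-built delta list
theorem map_delta_eq (points : List (Int × Int × Int)) :
    (PySem.List.pyRange 0 ((points.length : Int) - 1) 1).map (ctA_delta points)
      = ct_deltas points := by
  apply List.ext_getElem
  · simp [PySem.List.length_pyRange_one, ct_deltas]
  · intro k h1 h2
    have hk : k < points.length - 1 := by
      simpa [PySem.List.length_pyRange_one] using h1
    have hk1 : k + 1 < points.length := by omega
    have hkl : k < points.length := by omega
    have e1 := PySem.List.pyGetD_eq_getElem points (i := (k : Int)) ((0 : Int), (0 : Int), (0 : Int))
      (Int.natCast_nonneg k) (by exact_mod_cast hkl)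
    have e2 := PySem.List.pyGetD_eq_getElem points (i := (k : Int) + 1) ((0 : Int), (0 : Int), (0 : Int))
      (by omega) (by exact_mod_cast hk1)
    have ht : ((k : Int) + 1).toNat = k + 1 := by omega
    simp only [List.getElem_map, PySem.List.getElem_pyRange_one, zero_add, ctA_delta,
      e1, e2, Int.toNat_natCast, ht, ct_deltas]
    simp [List.getElem_zip]

-- the fold with A's step, finalized by the trailing flush, is B's recursive emitter
theorem fold_emit (ds : List (Int × Int × Int)) (out : List (List Int)) (acc : Int) :
    (if (ds.foldl ctA_step' (out, acc)).2 ≠ 0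
       then (ds.foldl ctA_step' (out, acc)).1 ++ [[0, 0, (ds.foldl ctA_step' (out, acc)).2]]
       else (ds.foldl ctA_step' (out, acc)).1) = out ++ ct_emit ds acc := by
  induction ds generalizing out acc with
  | nil =>
    by_cases h : acc = 0 <;> simp [ct_emit, h]
  | cons d rest ih =>
    obtain ⟨dx, dy, dt⟩ := d
    simp only [List.foldl_cons]
    by_cases hxy : dx = 0 ∧ dy = 0
    · by_cases ht : dt = 0
      · rw [show ctA_step' (out, acc) (dx, dy, dt) = (out, acc) from by
          simp [ctA_step', hxy, ht]]
        simpa [ct_emit, hxy, ht] using ih out acc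
      · rw [show ctA_step' (out, acc) (dx, dy, dt) = (out, acc + dt) from by
          simp [ctA_step', hxy, ht]]
        simpa [ct_emit, hxy] using ih out (acc + dt)
    · have hne : ¬(dx = 0 ∧ dy = 0 ∧ dt = 0) := fun h => hxy ⟨h.1, h.2.1⟩
      rw [show ctA_step' (out, acc) (dx, dy, dt) = (out ++ [[dx, dy, dt + acc]], 0) from by
          simp [ctA_step', hne, hxy]]
      simpa [ct_emit, hxy] using ih (out ++ [[dx, dy, dt + acc]]) 0

-- ===== VERDICT (by name: the statement is the Claim_ definition above) =====
theorem compress_trajectory_spec : Claim_equal_compress_trajectory := by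
  intro points _
  unfold Spec_compress_trajectory compress_trajectory compress_trajectory_alt
  have h1 : (PySem.List.pyRange 0 ((points.length : Int) - 1) 1).foldl (ctA_step points) ([], 0)
      = (ct_deltas points).foldl ctA_step' ([], 0) := by
    rw [← map_delta_eq, List.foldl_map]
    rfl
  show (if _ ≠ 0 then _ else _) = _
  rw [h1]
  simpa using fold_emit (ct_deltas points) [] 0
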